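-- pv_equiv track=rewrite | github.com/IraSkyx/MarrakechAI | MarrakechGUI.py | isometrie
-- ===== SOURCE A (Python) =====
-- L = 60 # la taille d'une case en pixels
--
-- def isometrie(coords, x0, y0, rot90, symx):
--     """Applique sur les coordonnées une translation de vecteur(x0, y0), une rotation de rot90 × 90° et une éventuelle symétrique droite sur l'axe des y"""
--     c = []
--     for (x, y) in coords:
--         if symx: x = L-x
--         if rot90%4 == 1:
--             x, y =  L-y, x
--         elif rot90%4 == 2:
--             x, y = L-x, L-y
--         elif rot90%4 == 3:
--             x, y = y, L-x
--         c.append(x0+x)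
--         c.append(y0+y)
--     return c
-- ===== SOURCE B (Python) =====
-- L = 60
--
-- def isometrie(coords, x0, y0, rot90, symx):
--     """Same isometry, but the four rotation cases collapse to rot90%4
--     applications of the elementary 90-degree rotation (x, y) -> (L-y, x)."""
--     c = []
--     k = rot90 % 4
--     for (x, y) in coords:
--         if symx:
--             x = L - x
--         for _ in range(k):
--             x, y = L - y, x
--         c.append(x0 + x)
--         c.append(y0 + y)
--     return c
-- ===== Notes on version B (the rewrite author's own statement) =====
-- stated objective: simpler
-- what changed: The four-way if/elif rotation chain is replaced by applying the single elementary 90-degree rotation (x,y)->(L-y,x) exactly rot90%4 times in an inner loop.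
import Mathlib
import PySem

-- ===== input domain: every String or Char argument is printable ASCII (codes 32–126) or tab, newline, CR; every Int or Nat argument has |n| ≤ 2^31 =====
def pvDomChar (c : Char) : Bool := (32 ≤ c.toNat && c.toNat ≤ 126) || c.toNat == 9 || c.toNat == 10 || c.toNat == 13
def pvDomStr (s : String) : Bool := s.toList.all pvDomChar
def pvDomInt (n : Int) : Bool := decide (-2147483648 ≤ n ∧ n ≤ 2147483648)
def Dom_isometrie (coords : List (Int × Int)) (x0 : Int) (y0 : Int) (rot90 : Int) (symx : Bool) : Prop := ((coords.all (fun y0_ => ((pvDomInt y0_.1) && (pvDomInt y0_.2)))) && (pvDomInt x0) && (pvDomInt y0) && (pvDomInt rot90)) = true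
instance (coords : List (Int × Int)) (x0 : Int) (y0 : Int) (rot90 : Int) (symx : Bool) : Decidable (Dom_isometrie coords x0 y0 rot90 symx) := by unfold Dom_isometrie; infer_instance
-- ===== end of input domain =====

-- ===== PORT A =====
-- One honest line: B replaces A's four-way if/elif rotation chain by rot90%4 applications
-- of the elementary 90° rotation (x,y) -> (L-y,x); objective: simpler.
def isometrie (coords : List (Int × Int)) (x0 : Int) (y0 : Int) (rot90 : Int) (symx : Bool) : List Int :=
  coords.foldl
    (fun c p =>
      let x := p.1
      let y := p.2
      let x := if symx then 60 - x else x
      let xy :=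
        if PySem.Int.mod rot90 4 = 1 then (60 - y, x)
        else if PySem.Int.mod rot90 4 = 2 then (60 - x, 60 - y)
        else if PySem.Int.mod rot90 4 = 3 then (y, 60 - x)
        else (x, y)
      c ++ [x0 + xy.1, y0 + xy.2])
    []

-- ===== PORT B =====
def pvRotStep (p : Int × Int) : Int × Int := (60 - p.2, p.1)

def pvRotIter : Nat → (Int × Int) → (Int × Int)
  | 0, p => p
  | n + 1, p => pvRotIter n (pvRotStep p)

def isometrie_alt (coords : List (Int × Int)) (x0 : Int) (y0 : Int) (rot90 : Int) (symx : Bool) : List Int :=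
  let k := (PySem.Int.mod rot90 4).toNat
  coords.foldl
    (fun c p =>
      let x := if symx then 60 - p.1 else p.1
      let xy := pvRotIter k (x, p.2)
      c ++ [x0 + xy.1, y0 + xy.2])
    []

-- ===== PRECONDITION & SPEC =====
def Spec_isometrie (coords : List (Int × Int)) (x0 : Int) (y0 : Int) (rot90 : Int) (symx : Bool) (out : List Int) : Prop := out = isometrie_alt coords x0 y0 rot90 symx
instance (coords : List (Int × Int)) (x0 : Int) (y0 : Int) (rot90 : Int) (symx : Bool) (out : List Int) : Decidable (Spec_isometrie coords x0 y0 rot90 symx out) := by unfold Spec_isometrie; infer_instance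

-- ===== CLAIM (what is proved, stated in full; the proofs are below) =====
def Claim_equal_isometrie : Prop := ∀ (coords : List (Int × Int)) (x0 : Int) (y0 : Int) (rot90 : Int) (symx : Bool), Dom_isometrie coords x0 y0 rot90 symx → Spec_isometrie coords x0 y0 rot90 symx (isometrie coords x0 y0 rot90 symx)

-- ===== LEMMAS AND PROOFS =====

-- ===== VERDICT (by name: the statement is the Claim_ definition above) =====
lemma pv_mod4 (r : Int) : r.fmod 4 = 0 ∨ r.fmod 4 = 1 ∨ r.fmod 4 = 2 ∨ r.fmod 4 = 3 := by
  have h : r.fmod 4 = r % 4 := by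
    rw [Int.fmod_eq_emod]
    simp
  omega

lemma pv_point (rot90 : Int) (symx : Bool) (p : Int × Int) :
    (let x := p.1
     let y := p.2
     let x := if symx then 60 - x else x
     if PySem.Int.mod rot90 4 = 1 then ((60:Int) - y, x)
     else if PySem.Int.mod rot90 4 = 2 then (60 - x, 60 - y)
     else if PySem.Int.mod rot90 4 = 3 then (y, 60 - x)
     else (x, y)) =
    pvRotIter (PySem.Int.mod rot90 4).toNat ((if symx then 60 - p.1 else p.1), p.2) := by
  rcases pv_mod4 rot90 with h | h | h | h <;>
    simp [PySem.Int.mod, h, pvRotIter, pvRotStep]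

theorem isometrie_spec : Claim_equal_isometrie := by
  intro coords x0 y0 rot90 symx _
  show isometrie coords x0 y0 rot90 symx = isometrie_alt coords x0 y0 rot90 symx
  unfold isometrie isometrie_alt
  congr 1
  funext c p
  have h := pv_point rot90 symx p
  simp only at h ⊢
  rw [h]
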